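-- pv_equiv track=rewrite | github.com/aman1108/Interview-Coding-Questions | Array/Noble Integer.py | solve
-- ===== SOURCE A (Python) =====
-- def solve(A):
--     n=len(A)
--     A.sort()
--     A.append(-1)
--     i=0
--     while(i<n):
--         while(A[i]==A[i+1]):
--             i=i+1
--         if ((n-i-1)==A[i]):
--             return 1
--         i=i+1
--     return -1
-- ===== SOURCE B (Python) =====
-- # Naive count-greater check for a Noble Integer. Sorts A in place like the
-- # original, but does not append any sentinel, so the observable mutation of the
-- # argument differs; the return value is what the equivalence is about.
-- def solve(A):
--     A.sort()
--     for x in A: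
--         if x == sum(1 for y in A if y > x):
--             return 1
--     return -1
-- ===== Notes on version B (the rewrite author's own statement) =====
-- stated objective: alternative
-- what changed: Replaces A's single duplicate-skipping index walk over the sorted array (with a -1 sentinel read) by a naive count-greater scan: for each element x of the sorted list, count the strictly greater elements and return 1 on the first x that equals its count; B sorts in place like A but does not append the -1 sentinel, so the in-place mutation of the argument differs (the claim is about the return value).
-- crash fix: On nonempty lists whose maximum is -1 (e.g. [-1]), A's duplicate-skip walks past the appended -1 sentinel and raises IndexError; B returns -1 there. — e.g. on solve([-1]): A raises IndexError, B returns -1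
import Mathlib
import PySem

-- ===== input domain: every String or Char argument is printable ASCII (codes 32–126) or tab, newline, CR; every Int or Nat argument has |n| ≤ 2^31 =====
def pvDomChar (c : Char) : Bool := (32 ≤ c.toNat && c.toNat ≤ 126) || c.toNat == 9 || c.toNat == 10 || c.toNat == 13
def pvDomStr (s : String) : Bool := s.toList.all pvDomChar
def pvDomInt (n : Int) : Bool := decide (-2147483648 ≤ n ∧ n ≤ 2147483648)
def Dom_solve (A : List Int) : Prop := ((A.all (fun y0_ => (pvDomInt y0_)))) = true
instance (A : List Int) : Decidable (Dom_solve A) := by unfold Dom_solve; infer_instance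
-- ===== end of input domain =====

-- B replaces A's duplicate-skipping post-sort sentinel pass by a naive count-greater
-- scan over the sorted list (alternative, not faster).  Both Pythons sort the argument
-- in place, but A additionally appends -1 to it and B does not: the mutation of the
-- argument differs, and the theorems here are about the RETURN value only.

-- ===== PORT A =====
-- A's outer while with the inner duplicate-skip while is flattened into one guarded
-- recursion on i (the inner while only re-enters the loop body after i += 1 anyway);
-- exact on Pre_solve, where the skip never runs past the sentinel.  s = sorted(A) ++ [-1];
-- indices i, i+1 are in range for every i < n under Pre_solve, so List.getD is exact.
def solveLoop (s : List Int) (n i : Nat) : Int :=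
  if _h : i < n then
    if s.getD i 0 = s.getD (i + 1) 0 then solveLoop s n (i + 1)
    else if (n : Int) - i - 1 = s.getD i 0 then 1
    else solveLoop s n (i + 1)
  else -1
termination_by n - i

def solve (A : List Int) : Int :=
  let n := A.length
  let s := PySem.List.sorted A (fun x => x) ++ [-1]
  solveLoop s n 0

-- ===== PORT B =====
-- sum(1 for y in t if y > x)
def countGreater (t : List Int) (x : Int) : Int :=
  ((t.filter (fun y => x < y)).length : Int)

def solveAltLoop (t : List Int) (xs : List Int) : Int :=
  match xs with
  | [] => -1
  | x :: rest => if x = countGreater t x then 1 else solveAltLoop t rest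

def solve_alt (A : List Int) : Int :=
  let t := PySem.List.sorted A (fun x => x)
  solveAltLoop t t

-- ===== PRECONDITION & SPEC =====
-- Pre_ excludes exactly the nonempty lists whose maximum is -1: there A's inner skip
-- walks past the appended -1 sentinel and raises IndexError.
def Pre_solve (A : List Int) : Prop := ¬ ((-1 : Int) ∈ A ∧ ∀ x ∈ A, x ≤ -1)
instance (A : List Int) : Decidable (Pre_solve A) := by unfold Pre_solve; infer_instance

def pvWitness_solve : List Int := [2, 0, 1]

-- On nonempty lists whose maximum is -1, A raises IndexError; B returns -1 there.
def Raises_solve (A : List Int) : Prop := (-1 : Int) ∈ A ∧ ∀ x ∈ A, x ≤ -1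
instance (A : List Int) : Decidable (Raises_solve A) := by unfold Raises_solve; infer_instance
def pvRaiseWitness_solve : List Int := [-1]
def pvRaiseWitnessOut_solve : Int := -1

def Spec_solve (A : List Int) (out : Int) : Prop := out = solve_alt A
instance (A : List Int) (out : Int) : Decidable (Spec_solve A out) := by unfold Spec_solve; infer_instance

-- ===== CLAIM (what is proved, stated in full; the proofs are below) =====
def Claim_equal_solve : Prop := ∀ (A : List Int), Dom_solve A → Pre_solve A → Spec_solve A (solve A)
def Claim_raises_solve : Prop := (∀ (A : List Int), Dom_solve A → Raises_solve A → ¬ Pre_solve A) ∧ (Dom_solve (pvRaiseWitness_solve) ∧ Raises_solve (pvRaiseWitness_solve) ∧ solve_alt (pvRaiseWitness_solve) = pvRaiseWitnessOut_solve)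

-- ===== LEMMAS AND PROOFS =====

-- in a ≤-sorted list, if position i holds the last occurrence of its value,
-- the number of strictly greater elements is exactly the number of elements after i
lemma count_greater_eq (t : List Int) (ht : t.Pairwise (· ≤ ·)) (i : Nat) (hi : i < t.length)
    (hlast : i + 1 = t.length ∨ ∃ h : i + 1 < t.length, t[i] < t[i+1]) :
    (t.filter (fun y => t[i] < y)).length = t.length - (i + 1) := by
  have hmono := List.pairwise_iff_getElem.mp ht
  have hgt : ∀ k (hk : k < t.length), i < k → t[i] < t[k] := by
    intro k hk hik
    rcases hlast with h1 | ⟨h1, hlt⟩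
    · omega
    · rcases Nat.eq_or_lt_of_le (Nat.succ_le_of_lt hik) with he | hl
      · simpa [← he] using hlt
      · exact lt_of_lt_of_le hlt (hmono (i+1) k h1 hk hl)
  have hsplit : t.filter (fun y => t[i] < y)
      = (t.take (i+1)).filter (fun y => t[i] < y) ++ (t.drop (i+1)).filter (fun y => t[i] < y) := by
    rw [← List.filter_append, List.take_append_drop]
  have h1 : (t.take (i+1)).filter (fun y => t[i] < y) = [] := by
    rw [List.filter_eq_nil_iff]
    intro a ha
    obtain ⟨j, hj, rfl⟩ := List.mem_take_iff_getElem.mp ha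
    have hji : j ≤ i := by omega
    have : t[j] ≤ t[i] := by
      rcases Nat.eq_or_lt_of_le hji with rfl | hl
      · exact le_refl _
      · exact hmono j i (by omega) hi hl
    simp only [decide_eq_true_eq]
    omega
  have h2 : (t.drop (i+1)).filter (fun y => t[i] < y) = t.drop (i+1) := by
    rw [List.filter_eq_self]
    intro a ha
    obtain ⟨k, hk, rfl⟩ := List.mem_iff_getElem.mp ha
    rw [List.getElem_drop]
    simp only [decide_eq_true_eq]
    exact hgt _ (by simp at hk; omega) (by omega)
  rw [hsplit, h1, h2]
  simp

-- every element of a ≤-sorted list is ≤ its last element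
lemma le_getLast_of_sorted (t : List Int) (ht : t.Pairwise (· ≤ ·)) (h : t ≠ [])
    (x : Int) (hx : x ∈ t) : x ≤ t.getLast h := by
  have hmono := List.pairwise_iff_getElem.mp ht
  obtain ⟨j, hj, rfl⟩ := List.mem_iff_getElem.mp hx
  rw [List.getLast_eq_getElem]
  rcases Nat.eq_or_lt_of_le (Nat.le_pred_of_lt hj) with he | hl
  · have hje : j = t.length - 1 := he
    simp only [hje]; exact le_refl _
  · exact hmono j (t.length - 1) (by omega) (by omega) hl

-- sentinel reads of A's working array s = t ++ [-1]
lemma getD_sentinel_lt (t : List Int) (i : Nat) (hi : i < t.length) :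
    (t ++ [(-1 : Int)]).getD i 0 = t[i] := by
  rw [List.getD_eq_getElem?_getD, List.getElem?_append_left hi]; simp [hi]

lemma getD_sentinel_end (t : List Int) : (t ++ [(-1 : Int)]).getD t.length 0 = -1 := by
  rw [List.getD_eq_getElem?_getD, List.getElem?_append_right (le_refl _)]; simp

-- A's flattened pass and B's count-greater scan agree from any start index,
-- on a ≤-sorted list whose last element is not -1
lemma main_loop (t : List Int) (ht : t.Pairwise (· ≤ ·))
    (hlast : ∀ h : t ≠ [], t.getLast h ≠ -1) (i : Nat) :
    solveLoop (t ++ [-1]) t.length i = solveAltLoop t (t.drop i) := by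
  rw [solveLoop]
  by_cases hi : i < t.length
  · rw [dif_pos hi]
    have hne_nil : t ≠ [] := by intro h; subst h; simp at hi
    have hlast' : t[t.length - 1]'(by omega) ≠ -1 := by
      have := hlast hne_nil
      rwa [List.getLast_eq_getElem] at this
    have hti : (t ++ [(-1 : Int)]).getD i 0 = t[i] := getD_sentinel_lt t i hi
    have hdrop : t.drop i = t[i] :: t.drop (i+1) := List.drop_eq_getElem_cons hi
    by_cases heq : (t ++ [(-1 : Int)]).getD i 0 = (t ++ [(-1 : Int)]).getD (i + 1) 0
    · -- duplicate: skip (A) / redundant identical check (B)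
      rw [if_pos heq]
      have hi1 : i + 1 < t.length := by
        by_contra hc
        have hie : i + 1 = t.length := by omega
        have : t[i] = -1 := by
          rw [← hti, heq, hie, getD_sentinel_end]
        have hii : i = t.length - 1 := by omega
        exact hlast' (by simp only [← hii]; exact this)
      have hdup : t[i] = t[i+1] := by
        rw [← hti, heq, getD_sentinel_lt t (i+1) hi1]
      rw [main_loop t ht hlast (i+1), hdrop]
      conv_rhs => rw [solveAltLoop]
      by_cases hc : t[i] = countGreater t t[i]
      · rw [if_pos hc, List.drop_eq_getElem_cons hi1, solveAltLoop, if_pos (by rw [← hdup]; exact hc)]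
      · rw [if_neg hc]
    · -- last occurrence of t[i]: A's count-after equals B's count-greater
      rw [if_neg heq]
      have hlastocc : i + 1 = t.length ∨ ∃ h : i + 1 < t.length, t[i] < t[i+1] := by
        by_cases hi1 : i + 1 < t.length
        · refine Or.inr ⟨hi1, ?_⟩
          have hne : t[i] ≠ t[i+1] := by
            rw [← hti, ← getD_sentinel_lt t (i+1) hi1]; exact heq
          have hle : t[i] ≤ t[i+1] :=
            List.pairwise_iff_getElem.mp ht i (i+1) hi hi1 (by omega)
          omega
        · exact Or.inl (by omega)
      have hcnt : countGreater t t[i] = (t.length : Int) - i - 1 := by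
        unfold countGreater
        rw [count_greater_eq t ht i hi hlastocc]
        omega
      have hcond : ((t.length : Int) - i - 1 = (t ++ [(-1 : Int)]).getD i 0)
          ↔ (t[i] = countGreater t t[i]) := by
        rw [hti, hcnt]; constructor <;> (intro h; omega)
      rw [hdrop]
      conv_rhs => rw [solveAltLoop]
      by_cases hc : t[i] = countGreater t t[i]
      · rw [if_pos (hcond.mpr hc), if_pos hc]
      · rw [if_neg (fun h => hc (hcond.mp h)), if_neg hc]
        exact main_loop t ht hlast (i+1)
  · rw [dif_neg hi, List.drop_eq_nil_of_le (by omega)]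
    rfl
termination_by t.length - i
decreasing_by all_goals omega

-- ===== VERDICT (by name: the statement is the Claim_ definition above) =====
theorem solve_spec : Claim_equal_solve := by
  intro A _ hpre
  unfold Spec_solve solve solve_alt
  set t := PySem.List.sorted A (fun x => x) with htdef
  have hlen : t.length = A.length := PySem.List.length_sorted A (fun x => x) false
  have hperm : t.Perm A := PySem.List.sorted_perm A (fun x => x) false
  have hpw : t.Pairwise (· ≤ ·) := by
    simpa using PySem.List.sorted_pairwise A (fun x => x)
  have hlast : ∀ h : t ≠ [], t.getLast h ≠ -1 := by
    intro h hcontra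
    apply hpre
    constructor
    · exact hperm.mem_iff.mp (hcontra ▸ List.getLast_mem h)
    · intro x hx
      have := le_getLast_of_sorted t hpw h x (hperm.mem_iff.mpr hx)
      omega
  show solveLoop (t ++ [-1]) A.length 0 = solveAltLoop t t
  rw [← hlen, main_loop t hpw hlast 0, List.drop_zero]

theorem solve_raises : Claim_raises_solve := by
  unfold Claim_raises_solve
  exact ⟨by intro A _ hr hp; exact hp hr, by decide⟩

-- self-check: B's port really returns the stated literal at the raise-region witness
theorem solve_raises_witness_ok : solve_alt pvRaiseWitness_solve = pvRaiseWitnessOut_solve :=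
  solve_raises.2.2.2
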